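-- pv_equiv track=rewrite | github.com/invadis/hash_func_infoprotect | main.py | codes_to_binary
-- ===== SOURCE A (Python) =====
-- def codes_to_binary(list_of_codes):
--     #перемножение чисел в массиве и добавление результата обратно к массиву
--     number = 1
--     for x in list_of_codes:
--         number *= x
--     #number = int(''.join(map(str, list_of_codes)))
--     list_of_codes.append(number)
--     list_of_binaries = []
--
--     for i in list_of_codes:
--         bin_code = f'{i:b}'
--         list_of_binaries.append(bin_code)
--
--     for i, j in enumerate(list_of_binaries):
--         list_of_binaries[i] = int(list_of_binaries[i])
--
--     return list_of_binaries
-- ===== SOURCE B (Python) =====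
-- def _to_bin_int(i):
--     # arithmetic binary-to-decimal conversion: extract bits of |i|,
--     # accumulate them against a decimal place value, reattach the sign
--     n, val, place = abs(i), 0, 1
--     while n > 0:
--         val += (n % 2) * place
--         place *= 10
--         n //= 2
--     return -val if i < 0 else val
--
--
-- def codes_to_binary(list_of_codes):
--     number = 1
--     for x in list_of_codes:
--         number *= x
--     list_of_codes.append(number)
--     return [_to_bin_int(i) for i in list_of_codes]
-- ===== Notes on version B (the rewrite author's own statement) =====
-- stated objective: alternative
-- what changed: Replaces per-element binary string formatting f'{i:b}' plus int() reparsing (and the index loop rewriting the list) with a direct arithmetic bit-extraction conversion (n % 2 / n //= 2 against a decimal place value) built in one comprehension; B performs the same in-place append of the product.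
import Mathlib
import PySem

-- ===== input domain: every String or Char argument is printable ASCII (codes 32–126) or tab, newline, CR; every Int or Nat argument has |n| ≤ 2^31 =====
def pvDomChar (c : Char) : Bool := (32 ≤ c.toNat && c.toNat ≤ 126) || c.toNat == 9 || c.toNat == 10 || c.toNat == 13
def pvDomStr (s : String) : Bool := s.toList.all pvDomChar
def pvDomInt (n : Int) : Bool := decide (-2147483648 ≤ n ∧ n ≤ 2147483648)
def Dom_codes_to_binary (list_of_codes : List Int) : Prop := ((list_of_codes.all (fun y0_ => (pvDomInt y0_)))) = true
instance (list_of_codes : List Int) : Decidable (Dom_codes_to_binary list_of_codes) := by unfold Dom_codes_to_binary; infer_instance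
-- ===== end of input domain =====

-- B replaces the f'{i:b}' + int() string round-trip by a direct arithmetic bit-extraction
-- conversion (alternative decomposition, same cost). Python A mutates its argument
-- (appends the product); Python B performs the same mutation; the equivalence proved
-- here is about the return value.

-- ===== PORT A =====
-- binary digits of n (most significant first), empty for 0: the digit part of f'{n:b}'
def pvBinDigits : Nat → List Char
  | 0 => []
  | n+1 => pvBinDigits ((n+1)/2) ++ [if (n+1) % 2 = 1 then '1' else '0']
decreasing_by omega

-- f'{i:b}' as a list of chars (exact: Python prints '-' then the binary of |i|, and '0' for 0)
def pvFmtBin (i : Int) : List Char :=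
  if i < 0 then '-' :: pvBinDigits i.natAbs
  else if i = 0 then ['0']
  else pvBinDigits i.natAbs

-- int(s) ported by hand, exact on the strings f'{i:b}' yields (optional leading '-',
-- then decimal digits, no whitespace/underscores) — which is all A feeds it
def pvParseDigits (cs : List Char) : Nat := cs.foldl (fun a c => a * 10 + (c.toNat - 48)) 0

def pvParseIntLit (cs : List Char) : Int :=
  match cs with
  | '-' :: ds => -(pvParseDigits ds : Int)
  | ds => (pvParseDigits ds : Int)

def codes_to_binary (list_of_codes : List Int) : List Int :=
  let number := list_of_codes.foldl (fun a x => a * x) 1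
  let codes := list_of_codes ++ [number]
  let list_of_binaries := codes.foldl (fun acc i => acc ++ [pvFmtBin i]) []
  -- the enumerate loop overwrites each string by its int in place; since the element
  -- type changes (str → int), the faithful typed port is the elementwise conversion
  list_of_binaries.map pvParseIntLit

-- ===== PORT B =====
-- the while loop of _to_bin_int: extract bits, accumulate against a decimal place value
def pvBinDec (n val place : Nat) : Nat :=
  if n = 0 then val else pvBinDec (n / 2) (val + (n % 2) * place) (place * 10)
decreasing_by omega

def pvToBinInt (i : Int) : Int :=
  let v := pvBinDec i.natAbs 0 1
  if i < 0 then -(v : Int) else (v : Int)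

def codes_to_binary_alt (list_of_codes : List Int) : List Int :=
  let number := list_of_codes.foldl (fun a x => a * x) 1
  (list_of_codes ++ [number]).map pvToBinInt

-- ===== PRECONDITION & SPEC =====
def Spec_codes_to_binary (list_of_codes : List Int) (out : List Int) : Prop := out = codes_to_binary_alt list_of_codes
instance (list_of_codes : List Int) (out : List Int) : Decidable (Spec_codes_to_binary list_of_codes out) := by unfold Spec_codes_to_binary; infer_instance

-- ===== CLAIM (what is proved, stated in full; the proofs are below) =====
def Claim_equal_codes_to_binary : Prop := ∀ (list_of_codes : List Int), Dom_codes_to_binary list_of_codes → Spec_codes_to_binary list_of_codes (codes_to_binary list_of_codes)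

-- ===== LEMMAS AND PROOFS =====
-- pvR n = the decimal reading of the binary digit string of n
def pvR : Nat → Nat
  | 0 => 0
  | n+1 => pvR ((n+1)/2) * 10 + (n+1) % 2
decreasing_by omega

theorem pvParseDigits_append (cs : List Char) (c : Char) :
    pvParseDigits (cs ++ [c]) = pvParseDigits cs * 10 + (c.toNat - 48) := by
  simp [pvParseDigits, List.foldl_append]

theorem pvParse_binDigits : ∀ n : Nat, pvParseDigits (pvBinDigits n) = pvR n := by
  intro n
  induction n using Nat.strong_induction_on with
  | _ n ih =>
    match n with
    | 0 => simp [pvBinDigits, pvR, pvParseDigits]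
    | m+1 =>
      rw [pvBinDigits, pvR, pvParseDigits_append, ih ((m+1)/2) (by omega)]
      by_cases h : (m+1) % 2 = 1
      · simp [h]
      · simp [h]; omega

theorem pvBinDec_eq : ∀ (n v p : Nat), pvBinDec n v p = v + p * pvR n := by
  intro n
  induction n using Nat.strong_induction_on with
  | _ n ih =>
    intro v p
    rw [pvBinDec]
    by_cases h : n = 0
    · simp [h, pvR]
    · rw [if_neg h, ih (n / 2) (by omega)]
      have hn : pvR n = pvR (n / 2) * 10 + n % 2 := by
        match n, h with
        | m+1, _ => rw [pvR]
      rw [hn]; ring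

theorem pvBinDigits_mem : ∀ (n : Nat) (c : Char), c ∈ pvBinDigits n → c = '0' ∨ c = '1' := by
  intro n
  induction n using Nat.strong_induction_on with
  | _ n ih =>
    match n with
    | 0 => intro c hc; simp [pvBinDigits] at hc
    | m+1 =>
      intro c hc
      rw [pvBinDigits] at hc
      rcases List.mem_append.mp hc with h | h
      · exact ih ((m+1)/2) (by omega) c h
      · simp at h; by_cases hb : (m+1) % 2 = 1 <;> simp [hb] at h <;> simp [h]

theorem pvParseIntLit_no_sign (cs : List Char) (h : ∀ c ∈ cs, c = '0' ∨ c = '1') :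
    pvParseIntLit cs = (pvParseDigits cs : Int) := by
  match cs with
  | [] => rfl
  | c :: ds =>
    rcases h c (by simp) with rfl | rfl <;> rfl

theorem pvConv_eq (i : Int) : pvParseIntLit (pvFmtBin i) = pvToBinInt i := by
  unfold pvFmtBin pvToBinInt
  by_cases h : i < 0
  · rw [if_pos h, if_pos h]
    show -(pvParseDigits (pvBinDigits i.natAbs) : Int) = _
    rw [pvParse_binDigits, pvBinDec_eq]
    simp
  · rw [if_neg h, if_neg h]
    by_cases h0 : i = 0
    · subst h0
      rw [pvBinDec]
      norm_num
      rfl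
    · rw [if_neg h0]
      rw [pvParseIntLit_no_sign _ (pvBinDigits_mem i.natAbs),
          pvParse_binDigits, pvBinDec_eq]
      simp

-- ===== VERDICT (by name: the statement is the Claim_ definition above) =====
theorem codes_to_binary_spec : Claim_equal_codes_to_binary := by
  intro l _
  show codes_to_binary l = codes_to_binary_alt l
  simp only [codes_to_binary, codes_to_binary_alt]
  rw [PySem.List.foldl_append_singleton_eq_map]
  simp only [List.nil_append, List.map_map]
  have hf : pvParseIntLit ∘ pvFmtBin = pvToBinInt := funext pvConv_eq
  rw [hf]
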